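-- pv_equiv track=rewrite | github.com/FaazAbidi/doccelerate | api/app/services/chunk_service.py | _calculate_chunk_line_positions
-- ===== SOURCE A (Python) =====
-- from typing import List, Dict, Any, Tuple
--
-- def _calculate_chunk_line_positions(content: str, chunks: List[str]) -> List[Tuple[int, int]]:
--     """Calculate line positions for each chunk"""
--     chunk_line_positions = []
--
--     for i, chunk_content in enumerate(chunks):
--         # Find where this chunk starts in the original content
--         if i == 0:
--             start_pos = 0
--         else:
--             # Use the previous chunk end to find where this one starts
--             prev_chunk = chunks[i-1]
--             # Find the position after the previous chunk
--             prev_end_pos = content.find(prev_chunk) + len(prev_chunk)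
--             # The current chunk starts somewhere after the previous one
--             # Need to find exact position accounting for potential overlaps
--             search_start = max(0, prev_end_pos - 200)  # Look back a bit to handle overlaps
--             remaining_content = content[search_start:]
--             chunk_start_in_remaining = remaining_content.find(chunk_content)
--             if chunk_start_in_remaining == -1:
--                 # Fallback if exact match isn't found (could happen with whitespace differences)
--                 # Use approximate position
--                 start_pos = prev_end_pos
--             else:
--                 start_pos = search_start + chunk_start_in_remaining
--
--         # Get chunk end position
--         end_pos = start_pos + len(chunk_content)
--
--         # Calculate line numbers
--         start_line = 1
--         end_line = 1
--
--         # Count newlines before start position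
--         start_text = content[:start_pos]
--         start_line = start_text.count('\n') + 1  # 1-based line numbers
--
--         # Count newlines before end position
--         end_text = content[:end_pos]
--         end_line = end_text.count('\n') + 1
--
--         # Ensure end_line is at least start_line
--         end_line = max(start_line, end_line)
--
--         chunk_line_positions.append((start_line, end_line))
--
--     return chunk_line_positions
-- ===== SOURCE B (Python) =====
-- def _calculate_chunk_line_positions(content, chunks):
--     """Same values as A, but line numbers come from a prefix table built once
--     (one pass over content) instead of slicing and counting per chunk."""
--     # lines[p] = 1 + number of newlines in content[:p]
--     lines = [1]
--     cur = 1
--     for ch in content: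
--         if ch == '\n':
--             cur += 1
--         lines.append(cur)
--     n = len(content)
--
--     def line_at(pos):
--         return lines[pos if pos < n else n]
--
--     result = []
--     prev = None
--     for chunk in chunks:
--         if prev is None:
--             start = 0
--         else:
--             prev_end = content.find(prev) + len(prev)
--             search_start = max(0, prev_end - 200)
--             j = content[search_start:].find(chunk)
--             start = prev_end if j == -1 else search_start + j
--         result.append((line_at(start), line_at(start + len(chunk))))
--         prev = chunk
--     return result
-- ===== Notes on version B (the rewrite author's own statement) =====
-- stated objective: alternative
-- what changed: B builds a prefix line-number table (lines[p] = 1 + newlines in content[:p]) in one pass over content and answers each chunk's start/end line by an O(1) table lookup, instead of A's per-chunk slicing of content[:pos] and re-counting its newlines; the start-position search (str.find on content and on the look-back window) is kept identical so every value, including the fallback branch, matches A exactly.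
import Mathlib
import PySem

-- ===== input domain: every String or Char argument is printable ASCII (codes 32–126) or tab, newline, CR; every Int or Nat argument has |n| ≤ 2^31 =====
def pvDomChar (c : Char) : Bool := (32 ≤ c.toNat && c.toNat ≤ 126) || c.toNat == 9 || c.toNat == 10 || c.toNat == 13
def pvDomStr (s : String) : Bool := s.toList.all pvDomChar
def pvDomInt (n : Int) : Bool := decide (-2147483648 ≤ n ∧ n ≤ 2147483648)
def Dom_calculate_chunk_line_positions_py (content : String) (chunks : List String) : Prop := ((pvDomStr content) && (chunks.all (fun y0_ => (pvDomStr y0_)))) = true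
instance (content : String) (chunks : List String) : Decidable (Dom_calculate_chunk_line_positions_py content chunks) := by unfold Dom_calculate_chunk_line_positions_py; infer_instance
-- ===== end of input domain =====

-- B replaces A's per-chunk prefix-slice + newline count with a line table built once; same values everywhere.

-- ===== PORT A =====
-- the for-loop over enumerate(chunks): each iteration uses only the current chunk and chunks[i-1],
-- so the loop is recursion over the chunk list carrying the previous chunk (none at i = 0).
def pvGoA (content : String) (prev : Option String) : List String → List (Int × Int)
  | [] => []
  | c :: rest =>
    let start_pos : Int :=
      match prev with
      | none => 0
      | some p =>
        let prev_end_pos := PySem.Str.find content p + (PySem.Str.len p : Int)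
        let search_start := max 0 (prev_end_pos - 200)
        let remaining_content := PySem.Str.slice content (some search_start) none
        let chunk_start_in_remaining := PySem.Str.find remaining_content c
        if chunk_start_in_remaining = -1 then prev_end_pos
        else search_start + chunk_start_in_remaining
    let end_pos : Int := start_pos + (PySem.Str.len c : Int)
    let start_line : Int := (PySem.Str.count (PySem.Str.slice content none (some start_pos)) "\n" : Int) + 1
    let end_line : Int := (PySem.Str.count (PySem.Str.slice content none (some end_pos)) "\n" : Int) + 1
    let end_line' : Int := max start_line end_line
    (start_line, end_line') :: pvGoA content (some c) rest

def calculate_chunk_line_positions_py (content : String) (chunks : List String) : List (Int × Int) :=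
  pvGoA content none chunks

-- ===== PORT B =====
-- 'cur' scan building lines[1..n]; lines = [1] ++ this
def pvBuildLines (cur : Int) : List Char → List Int
  | [] => []
  | c :: rest =>
    let cur' := if c = '\n' then cur + 1 else cur
    cur' :: pvBuildLines cur' rest

-- line_at: lines[pos if pos < n else n]; the index is always in range in Source B, getD's default is never used
def pvLineAt (lines : List Int) (n : Nat) (pos : Int) : Int :=
  lines.getD (min pos.toNat n) 1

def pvGoB (content : String) (lines : List Int) (n : Nat) (prev : Option String) :
    List String → List (Int × Int)
  | [] => []
  | c :: rest =>
    let start : Int :=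
      match prev with
      | none => 0
      | some p =>
        let prev_end := PySem.Str.find content p + (PySem.Str.len p : Int)
        let search_start := max 0 (prev_end - 200)
        let j := PySem.Str.find (PySem.Str.slice content (some search_start) none) c
        if j = -1 then prev_end else search_start + j
    (pvLineAt lines n start, pvLineAt lines n (start + (PySem.Str.len c : Int))) ::
      pvGoB content lines n (some c) rest

def calculate_chunk_line_positions_py_alt (content : String) (chunks : List String) : List (Int × Int) :=
  pvGoB content (1 :: pvBuildLines 1 content.toList) content.toList.length none chunks

-- ===== PRECONDITION & SPEC =====
def Spec_calculate_chunk_line_positions_py (content : String) (chunks : List String) (out : List (Int × Int)) : Prop := out = calculate_chunk_line_positions_py_alt content chunks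
instance (content : String) (chunks : List String) (out : List (Int × Int)) : Decidable (Spec_calculate_chunk_line_positions_py content chunks out) := by unfold Spec_calculate_chunk_line_positions_py; infer_instance

-- ===== CLAIM (what is proved, stated in full; the proofs are below) =====
def Claim_equal_calculate_chunk_line_positions_py : Prop := ∀ (content : String) (chunks : List String), Dom_calculate_chunk_line_positions_py content chunks → Spec_calculate_chunk_line_positions_py content chunks (calculate_chunk_line_positions_py content chunks)

-- ===== LEMMAS AND PROOFS =====

-- count.go with a single-character needle advances one position per step: it is List.count
lemma pvCountGoSingle (c : Char) : ∀ (fuel : Nat) (l : List Char) (acc : Nat),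
    l.length ≤ fuel → PySem.Chars.count.go [c] fuel l acc = acc + l.count c := by
  intro fuel
  induction fuel with
  | zero =>
    intro l acc h
    have : l = [] := List.eq_nil_of_length_eq_zero (Nat.le_zero.mp h)
    subst this
    simp [PySem.Chars.count.go]
  | succ n ih =>
    intro l acc h
    cases l with
    | nil => simp [PySem.Chars.count.go]
    | cons hd t =>
      have hlen : t.length ≤ n := by simpa using h
      by_cases hc : hd = c
      · subst hc
        have hpre : List.isPrefixOf [hd] (hd :: t) = true := by
          simp [List.isPrefixOf]
        simp only [PySem.Chars.count.go, hpre, if_pos]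
        rw [ih _ _ (by simpa using hlen)]
        simp
        omega
      · have hpre : List.isPrefixOf [c] (hd :: t) = false := by
          simp only [List.isPrefixOf, Bool.and_true]
          exact decide_eq_false (fun h' => hc h'.symm)
        simp only [PySem.Chars.count.go, hpre]
        rw [if_neg (by simp)]
        rw [ih _ _ hlen]
        have : (hd :: t).count c = t.count c := by
          simp [List.count_cons]
          exact hc
        omega

lemma pvCountSingle (c : Char) (l : List Char) : PySem.Chars.count l [c] = l.count c := by
  unfold PySem.Chars.count
  simp [pvCountGoSingle c l.length l 0 le_rfl]

-- the table of Port B: entry min i |l| of (cur :: pvBuildLines cur l) is cur + newlines in l[:i]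
lemma pvTable : ∀ (l : List Char) (cur : Int) (i : Nat),
    (cur :: pvBuildLines cur l).getD (min i l.length) 1 = cur + ((l.take i).count '\n' : Int) := by
  intro l
  induction l with
  | nil => intro cur i; simp
  | cons hd t ih =>
    intro cur i
    cases i with
    | zero => simp
    | succ j =>
      have hmin : min (j + 1) (hd :: t).length = (min j t.length) + 1 := by
        simp only [List.length_cons]; omega
      rw [hmin]
      simp only [pvBuildLines, List.getD_cons_succ, List.take_succ_cons, List.count_cons]
      rw [ih]
      by_cases hc : hd = '\n' <;> simp [hc]
      omega

-- A's prefix-count line number equals B's table lookup, for any non-negative position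
lemma pvLine_eq (content : String) (pos : Int) (h : 0 ≤ pos) :
    (PySem.Str.count (PySem.Str.slice content none (some pos)) "\n" : Int) + 1
      = pvLineAt (1 :: pvBuildLines 1 content.toList) content.toList.length pos := by
  rw [PySem.Str.count_eq]
  have hsl : (PySem.Str.slice content none (some pos)).toList
      = content.toList.take pos.toNat := by
    rw [PySem.Str.toList_slice, PySem.Chars.slice_eq_listSlice, PySem.List.slice_to _ h]
  rw [hsl]
  show (PySem.Chars.count _ ['\n'] : Int) + 1 = _
  rw [pvCountSingle]
  unfold pvLineAt
  rw [pvTable content.toList 1 pos.toNat]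
  ring

-- newline counts over prefixes are monotone, so A's max(start_line, end_line) is end_line
lemma pvCount_take_mono (l : List Char) (c : Char) {a b : Nat} (h : a ≤ b) :
    (l.take a).count c ≤ (l.take b).count c :=
  ((List.take_prefix_take_left h).sublist).count_le c

lemma pvLineAt_mono (content : String) {a b : Int} (hab : a ≤ b) :
    pvLineAt (1 :: pvBuildLines 1 content.toList) content.toList.length a
      ≤ pvLineAt (1 :: pvBuildLines 1 content.toList) content.toList.length b := by
  unfold pvLineAt
  rw [pvTable content.toList 1 a.toNat, pvTable content.toList 1 b.toNat]
  have := pvCount_take_mono content.toList '\n' (Int.toNat_le_toNat hab)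
  omega

-- the shared start-position expression is non-negative (find ≥ -1, and find "" = 0)
lemma pvStart_nonneg (content : String) (p c : String) :
    0 ≤ (let prev_end := PySem.Str.find content p + (PySem.Str.len p : Int)
         let search_start := max 0 (prev_end - 200)
         let j := PySem.Str.find (PySem.Str.slice content (some search_start) none) c
         if j = -1 then prev_end else search_start + j) := by
  simp only
  have hfind : -1 ≤ PySem.Str.find content p := by
    rw [PySem.Str.find_eq]; exact PySem.Chars.neg_one_le_find _ _
  split
  · -- fallback branch: prev_end = find(p) + len(p)
    cases hp : p.toList with
    | nil =>
      simp [PySem.Str.len_eq, hp]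
    | cons x xs =>
      have hlen : 1 ≤ (PySem.Str.len p : Int) := by
        rw [PySem.Str.len_eq, hp]
        exact_mod_cast Nat.succ_le_succ (Nat.zero_le _)
      omega
  · -- found branch: search_start + j with j ≠ -1, j ≥ -1 hence j ≥ 0
    have hj : -1 ≤ PySem.Str.find (PySem.Str.slice content (some (max 0 (PySem.Str.find content p + (PySem.Str.len p : Int) - 200))) none) c := by
      rw [PySem.Str.find_eq]; exact PySem.Chars.neg_one_le_find _ _
    rename_i hne
    have : 0 ≤ max 0 (PySem.Str.find content p + (PySem.Str.len p : Int) - 200) := le_max_left _ _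
    omega

-- the recursions agree step by step
lemma pvGo_eq (content : String) : ∀ (cs : List String) (prev : Option String),
    pvGoA content prev cs
      = pvGoB content (1 :: pvBuildLines 1 content.toList) content.toList.length prev cs := by
  intro cs
  induction cs with
  | nil => intro prev; rfl
  | cons c rest ih =>
    intro prev
    simp only [pvGoA, pvGoB]
    refine congrArg₂ _ ?_ (ih (some c))
    -- the start positions are literally the same expression; name it
    set sp : Int :=
      (match prev with
       | none => 0
       | some p =>
         let prev_end := PySem.Str.find content p + (PySem.Str.len p : Int)
         let search_start := max 0 (prev_end - 200)
         let j := PySem.Str.find (PySem.Str.slice content (some search_start) none) c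
         if j = -1 then prev_end else search_start + j) with hsp
    have hsp0 : 0 ≤ sp := by
      rw [hsp]
      cases prev with
      | none => simp
      | some p => exact pvStart_nonneg content p c
    have hlen0 : (0 : Int) ≤ (PySem.Str.len c : Int) := Int.natCast_nonneg _
    have hep0 : 0 ≤ sp + (PySem.Str.len c : Int) := by omega
    have hle : sp ≤ sp + (PySem.Str.len c : Int) := by omega
    refine Prod.ext ?_ ?_
    · exact pvLine_eq content sp hsp0
    · show max _ _ = _
      rw [pvLine_eq content sp hsp0, pvLine_eq content _ hep0]
      exact max_eq_right (pvLineAt_mono content hle)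

-- ===== VERDICT (by name: the statement is the Claim_ definition above) =====
theorem calculate_chunk_line_positions_py_spec : Claim_equal_calculate_chunk_line_positions_py := by
  intro content chunks _
  show calculate_chunk_line_positions_py content chunks = _
  unfold calculate_chunk_line_positions_py calculate_chunk_line_positions_py_alt
  exact pvGo_eq content chunks none
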